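-- pv_equiv track=rewrite | github.com/docToolchain/aoc-2020 | day12/python/jamhocken/solution.py | calculate_dp
-- ===== SOURCE A (Python) =====
-- def calculate_dp(dp_prev, value, code):
--     if code == 'E':
--         return (dp_prev[0],dp_prev[1],dp_prev[2] + value)
--     elif code == 'W':
--         return (dp_prev[0],dp_prev[1],dp_prev[2] - value)
--     elif code == 'N':
--         return (dp_prev[0],dp_prev[1]+value,dp_prev[2])
--     elif code == 'S':
--         return (dp_prev[0],dp_prev[1]-value,dp_prev[2])
--     elif code == 'F':
--         return calculate_dp(dp_prev,value,dp_prev[0])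
--     else:
--         if code == 'L':
--             value *= -1
--         return rotate_ship(dp_prev, value)
--
-- def rotate_ship(dp_prev, value):
--     cardinal_directions = ['N','E','S','W']
--     turns = value // 90
--     car_dir = cardinal_directions.index(dp_prev[0])
--     return (cardinal_directions[(car_dir+turns) % 4],dp_prev[1],dp_prev[2])
-- ===== SOURCE B (Python) =====
-- # Vector-state rewrite: headings live as unit vectors (dy,dx); translation adds
-- # value*vector, F substitutes the heading's vector, and rotation iterates the
-- # 90-degree right-turn map (hy,hx)->(-hx,hy) instead of list-index arithmetic.
-- _UNIT = {'N': (1, 0), 'S': (-1, 0), 'E': (0, 1), 'W': (0, -1)}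
-- _LETTER = {(1, 0): 'N', (-1, 0): 'S', (0, 1): 'E', (0, -1): 'W'}
--
-- def calculate_dp(dp_prev, value, code):
--     heading, y, x = dp_prev
--     if code in ('E', 'W', 'N', 'S', 'F'):
--         dy, dx = _UNIT[heading if code == 'F' else code]
--         return (heading, y + value * dy, x + value * dx)
--     turns = (-value if code == 'L' else value) // 90
--     hy, hx = _UNIT[heading]
--     for _ in range(turns % 4):
--         hy, hx = -hx, hy
--     return (_LETTER[(hy, hx)], y, x)
-- ===== Notes on version B (the rewrite author's own statement) =====
-- stated objective: alternative
-- what changed: B represents the heading as a unit (dy,dx) vector: translations (and F, by substituting the heading's vector) add value*vector componentwise, and rotation iterates the 90-degree right-turn map (hy,hx)->(-hx,hy) turns%4 times instead of A's list-index-plus-modulo arithmetic and F-recursion.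
import Mathlib
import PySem

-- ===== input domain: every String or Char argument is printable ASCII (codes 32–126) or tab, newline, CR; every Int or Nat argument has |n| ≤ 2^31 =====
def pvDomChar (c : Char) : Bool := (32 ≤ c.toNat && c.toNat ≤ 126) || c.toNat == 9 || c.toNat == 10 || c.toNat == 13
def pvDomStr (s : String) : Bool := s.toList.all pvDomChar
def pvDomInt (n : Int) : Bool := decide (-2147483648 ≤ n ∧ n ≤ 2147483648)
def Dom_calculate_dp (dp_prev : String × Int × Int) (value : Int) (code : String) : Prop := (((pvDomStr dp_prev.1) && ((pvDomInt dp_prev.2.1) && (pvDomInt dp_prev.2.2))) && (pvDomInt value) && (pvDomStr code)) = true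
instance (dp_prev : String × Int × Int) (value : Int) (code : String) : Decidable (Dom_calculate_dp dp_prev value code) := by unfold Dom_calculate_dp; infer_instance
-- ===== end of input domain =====

-- B keeps the heading as a unit (dy,dx) vector and rotates it by iterating the 90-degree
-- right-turn map, replacing A's list-index arithmetic and F-recursion (objective: alternative).
-- ===== PORT A =====
def rotate_ship (dp_prev : String × Int × Int) (value : Int) : String × Int × Int :=
  let cardinal_directions := ["N", "E", "S", "W"]
  let turns := PySem.Int.floordiv value 90
  -- .index raises ValueError for a non-cardinal heading: excluded by Pre_calculate_dp,
  -- so the .getD 0 default is never consulted on admitted inputs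
  let car_dir := (PySem.List.index? cardinal_directions dp_prev.1).getD 0
  -- (car_dir + turns) % 4 lies in [0,4), so this pyGetD is Python's in-range xs[i]
  (PySem.List.pyGetD cardinal_directions (PySem.Int.mod ((car_dir : Int) + turns) 4) dp_prev.1,
    dp_prev.2.1, dp_prev.2.2)

-- A's 'F' branch recurses once with code := dp_prev[0]; since re-meeting 'F' would make the
-- Python diverge (outside Pre_), the single unfolding is written as this non-'F' core.
def calculate_dp_core (dp_prev : String × Int × Int) (value : Int) (code : String) : String × Int × Int :=
  if code = "E" then (dp_prev.1, dp_prev.2.1, dp_prev.2.2 + value)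
  else if code = "W" then (dp_prev.1, dp_prev.2.1, dp_prev.2.2 - value)
  else if code = "N" then (dp_prev.1, dp_prev.2.1 + value, dp_prev.2.2)
  else if code = "S" then (dp_prev.1, dp_prev.2.1 - value, dp_prev.2.2)
  else
    let value := if code = "L" then value * -1 else value
    rotate_ship dp_prev value

def calculate_dp (dp_prev : String × Int × Int) (value : Int) (code : String) : String × Int × Int :=
  if code = "E" then (dp_prev.1, dp_prev.2.1, dp_prev.2.2 + value)
  else if code = "W" then (dp_prev.1, dp_prev.2.1, dp_prev.2.2 - value)
  else if code = "N" then (dp_prev.1, dp_prev.2.1 + value, dp_prev.2.2)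
  else if code = "S" then (dp_prev.1, dp_prev.2.1 - value, dp_prev.2.2)
  else if code = "F" then calculate_dp_core dp_prev value dp_prev.1
  else
    let value := if code = "L" then value * -1 else value
    rotate_ship dp_prev value

-- ===== PORT B =====
def pvUnit : PySem.Dict String (Int × Int) :=
  PySem.Dict.ofList [("N", (1, 0)), ("S", (-1, 0)), ("E", (0, 1)), ("W", (0, -1))]

def pvLetter : PySem.Dict (Int × Int) String :=
  PySem.Dict.ofList [((1, 0), "N"), ((-1, 0), "S"), ((0, 1), "E"), ((0, -1), "W")]

-- one 90-degree right turn of a (dy,dx) unit vector: (hy, hx) -> (-hx, hy)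
def pvRot1 (v : Int × Int) : Int × Int := (-v.2, v.1)

def calculate_dp_alt (dp_prev : String × Int × Int) (value : Int) (code : String) : String × Int × Int :=
  let heading := dp_prev.1
  let y := dp_prev.2.1
  let x := dp_prev.2.2
  if code = "E" ∨ code = "W" ∨ code = "N" ∨ code = "S" ∨ code = "F" then
    -- _UNIT[...] raises KeyError only for 'F' with a non-cardinal heading: excluded by
    -- Pre_calculate_dp, so the .getD default is never consulted on admitted inputs
    let d := (PySem.Dict.get? pvUnit (if code = "F" then heading else code)).getD (0, 0)
    (heading, y + value * d.1, x + value * d.2)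
  else
    let turns := PySem.Int.floordiv (if code = "L" then -value else value) 90
    -- _UNIT[heading] raises KeyError for a non-cardinal heading: excluded by Pre_calculate_dp
    let v0 := (PySem.Dict.get? pvUnit heading).getD (0, 0)
    -- 'for _ in range(turns % 4)': turns % 4 lies in [0,4), so the loop is that many turns
    let v := pvRot1^[(PySem.Int.mod turns 4).toNat] v0
    -- _LETTER[v] never raises: the iterate stays on the four unit vectors
    ((PySem.Dict.get? pvLetter v).getD heading, y, x)

-- ===== PRECONDITION =====
-- Pre_ excludes exactly the inputs where Python A raises or diverges: a ValueError from
-- list.index when the heading must be consulted (rotation, or an 'F' forwarding to a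
-- non-translation heading) but is not one of N/E/S/W, and the infinite recursion at heading 'F'.
def Pre_calculate_dp (dp_prev : String × Int × Int) (value : Int) (code : String) : Prop :=
  code = "E" ∨ code = "W" ∨ code = "N" ∨ code = "S" ∨
  dp_prev.1 = "N" ∨ dp_prev.1 = "E" ∨ dp_prev.1 = "S" ∨ dp_prev.1 = "W"

instance (dp_prev : String × Int × Int) (value : Int) (code : String) : Decidable (Pre_calculate_dp dp_prev value code) := by unfold Pre_calculate_dp; infer_instance

def pvWitness_calculate_dp : (String × Int × Int) × Int × String := (("N", 3, 7), 90, "R")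

-- ===== SPEC =====
def Spec_calculate_dp (dp_prev : String × Int × Int) (value : Int) (code : String) (out : String × Int × Int) : Prop := out = calculate_dp_alt dp_prev value code
instance (dp_prev : String × Int × Int) (value : Int) (code : String) (out : String × Int × Int) : Decidable (Spec_calculate_dp dp_prev value code out) := by unfold Spec_calculate_dp; infer_instance

-- ===== CLAIM (what is proved, stated in full; the proofs are below) =====
def Claim_equal_calculate_dp : Prop := ∀ (dp_prev : String × Int × Int) (value : Int) (code : String), Dom_calculate_dp dp_prev value code → Pre_calculate_dp dp_prev value code → Spec_calculate_dp dp_prev value code (calculate_dp dp_prev value code)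

-- ===== LEMMAS AND PROOFS =====
-- shift the unbounded turn count into [0,4) on A's side
lemma mod4_shift (i t : Int) : PySem.Int.mod (i + t) 4 = PySem.Int.mod (i + PySem.Int.mod t 4) 4 := by
  simp only [PySem.Int.mod_eq_emod_of_pos (by norm_num : (0:Int) < 4)]
  omega

-- the rotation branches agree for every cardinal heading and every value argument
lemma rot_agree (h : String) (hh : h = "N" ∨ h = "E" ∨ h = "S" ∨ h = "W") (y x t : Int) :
    rotate_ship (h, y, x) t =
      (((PySem.Dict.get? pvLetter
          (pvRot1^[(PySem.Int.mod (PySem.Int.floordiv t 90) 4).toNat]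
            ((PySem.Dict.get? pvUnit h).getD (0, 0)))).getD h), y, x) := by
  simp only [rotate_ship]
  generalize PySem.Int.floordiv t 90 = d
  have h4 : (0:Int) < 4 := by norm_num
  have hr0 := PySem.Int.mod_nonneg d h4
  have hr1 := PySem.Int.mod_lt d h4
  have hemod := PySem.Int.mod_eq_emod_of_pos (a := d) (b := 4) h4
  have hrc : PySem.Int.mod d 4 = 0 ∨ PySem.Int.mod d 4 = 1 ∨
      PySem.Int.mod d 4 = 2 ∨ PySem.Int.mod d 4 = 3 := by omega
  rcases hh with h | h | h | h <;> subst h <;>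
    rw [mod4_shift] <;>
      rcases hrc with h2 | h2 | h2 | h2 <;> rw [h2] <;> rfl

theorem calculate_dp_spec : Claim_equal_calculate_dp := by
  intro dp_prev value code _hdom hpre
  obtain ⟨h, y, x⟩ := dp_prev
  unfold Spec_calculate_dp
  by_cases hE : code = "E"
  · subst hE
    simp [calculate_dp, calculate_dp_alt,
      show (PySem.Dict.get? pvUnit "E").getD ((0:Int),(0:Int)) = ((0:Int),(1:Int)) from by decide]
  by_cases hW : code = "W"
  · subst hW
    simp [calculate_dp, calculate_dp_alt,
      show (PySem.Dict.get? pvUnit "W").getD ((0:Int),(0:Int)) = ((0:Int),(-1:Int)) from by decide]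
    ring
  by_cases hN : code = "N"
  · subst hN
    simp [calculate_dp, calculate_dp_alt,
      show (PySem.Dict.get? pvUnit "N").getD ((0:Int),(0:Int)) = ((1:Int),(0:Int)) from by decide]
  by_cases hS : code = "S"
  · subst hS
    simp [calculate_dp, calculate_dp_alt,
      show (PySem.Dict.get? pvUnit "S").getD ((0:Int),(0:Int)) = ((-1:Int),(0:Int)) from by decide]
    ring
  have hh : h = "N" ∨ h = "E" ∨ h = "S" ∨ h = "W" := by
    rcases hpre with c | c | c | c | h2 | h2 | h2 | h2 <;> first | (exact absurd c (by assumption)) | tauto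
  by_cases hF : code = "F"
  · subst hF
    rcases hh with h2 | h2 | h2 | h2 <;> subst h2 <;>
      simp [calculate_dp, calculate_dp_core, calculate_dp_alt,
        show (PySem.Dict.get? pvUnit "N").getD ((0:Int),(0:Int)) = ((1:Int),(0:Int)) from by decide,
        show (PySem.Dict.get? pvUnit "E").getD ((0:Int),(0:Int)) = ((0:Int),(1:Int)) from by decide,
        show (PySem.Dict.get? pvUnit "S").getD ((0:Int),(0:Int)) = ((-1:Int),(0:Int)) from by decide,
        show (PySem.Dict.get? pvUnit "W").getD ((0:Int),(0:Int)) = ((0:Int),(-1:Int)) from by decide] <;>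
      ring
  · have hval : (if code = "L" then value * -1 else value) = (if code = "L" then -value else value) := by
      split_ifs <;> ring
    simp only [calculate_dp, calculate_dp_alt, if_neg hE, if_neg hW, if_neg hN, if_neg hS, if_neg hF,
      if_neg (by simp [hE, hW, hN, hS, hF] : ¬(code = "E" ∨ code = "W" ∨ code = "N" ∨ code = "S" ∨ code = "F"))]
    rw [hval]
    exact rot_agree h hh y x _

-- ===== VERDICT (by name: the statement is the Claim_ definition above) =====
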